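-- pv_equiv track=rewrite | github.com/TheLX5/APDKC2-BasePatch | parse_questions.py | filter_characters
-- ===== SOURCE A (Python) =====
-- def filter_characters(string: str):
--     string = string.lower()
--     string = string.replace(" -", "")
--     f = "!#$%&/()+-/'"
--     for char in f:
--         string = string.replace(char, "")
--     string = string.replace(" ", "_")
--     return string
-- ===== SOURCE B (Python) =====
-- def filter_characters(string: str):
--     cs = string.lower()
--     out = []
--     i, n = 0, len(cs)
--     while i < n:
--         c = cs[i]
--         if c == " " and i + 1 < n and cs[i + 1] == "-":
--             i += 2  # the " -" pair is deleted
--         elif c in "!#$%&/()+'-":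
--             i += 1
--         else:
--             out.append("_" if c == " " else c)
--             i += 1
--     return "".join(out)
-- ===== Notes on version B (the rewrite author's own statement) =====
-- stated objective: alternative
-- what changed: B replaces A's 14 staged whole-string replace passes (the space-hyphen pair pass, one deletion pass per punctuation character, a final space pass) with one left-to-right scan with two-character lookahead that deletes space-hyphen pairs, drops punctuation and maps space to underscore in a single traversal.
import Mathlib
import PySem

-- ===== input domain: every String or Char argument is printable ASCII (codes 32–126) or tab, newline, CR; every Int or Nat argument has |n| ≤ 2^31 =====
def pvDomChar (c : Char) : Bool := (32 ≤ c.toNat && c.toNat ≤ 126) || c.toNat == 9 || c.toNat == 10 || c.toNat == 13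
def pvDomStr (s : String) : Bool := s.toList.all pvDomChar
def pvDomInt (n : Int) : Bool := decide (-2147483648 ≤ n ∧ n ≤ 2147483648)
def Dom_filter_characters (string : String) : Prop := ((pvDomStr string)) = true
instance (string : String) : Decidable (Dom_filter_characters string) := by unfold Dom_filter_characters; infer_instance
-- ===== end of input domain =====

-- B replaces A's staged whole-string replace passes with one recursive left-to-right scan
-- with two-character lookahead (delete " -" pairs, drop punctuation, map space to underscore);
-- objective: alternative (single traversal instead of 14 passes).

-- ===== PORT A =====
-- the characters of A's string f = "!#$%&/()+-/'" (the for loop iterates over them one by one)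
def pvPunctA : List Char := ['!', '#', '$', '%', '&', '/', '(', ')', '+', '-', '/', '\'']

def filter_characters (string : String) : String :=
  let s1 := PySem.Str.lower string
  let s2 := PySem.Str.replace s1 " -" ""
  -- 'for char in f: string = string.replace(char, "")'
  let s3 := pvPunctA.foldl (fun acc c => PySem.Str.replace acc (String.ofList [c]) "") s2
  PySem.Str.replace s3 " " "_"

-- ===== PORT B =====
-- the characters of B's membership test "!#$%&/()+'-"
def pvPunctB : List Char := ['!', '#', '$', '%', '&', '/', '(', ')', '+', '\'', '-']

-- the while loop of Source B: one scan with two-character lookahead over the lowered characters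
def fcGo : List Char → List Char
  | [] => []
  | ' ' :: '-' :: rest => fcGo rest                -- the " -" pair is deleted
  | c :: rest =>
      if pvPunctB.contains c then fcGo rest        -- punctuation dropped
      else (if c = ' ' then '_' else c) :: fcGo rest

def filter_characters_alt (string : String) : String :=
  String.ofList (fcGo (PySem.Str.lower string).toList)

-- ===== PRECONDITION & SPEC =====
def Spec_filter_characters (string : String) (out : String) : Prop := out = filter_characters_alt string
instance (string : String) (out : String) : Decidable (Spec_filter_characters string out) := by unfold Spec_filter_characters; infer_instance

-- ===== CLAIM =====
def Claim_equal_filter_characters : Prop := ∀ (string : String), Dom_filter_characters string → Spec_filter_characters string (filter_characters string)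

-- ===== LEMMAS AND PROOFS =====

-- A's first pass, on the char-list side: delete every " -" occurrence, scanning left to right
def del2 : List Char → List Char
  | [] => []
  | ' ' :: '-' :: rest => del2 rest
  | c :: rest => c :: del2 rest

-- unfolding del2 / fcGo on a cons that is not a " -" pair
theorem del2_cons (a b : Char) (t : List Char) (hab : ¬(a = ' ' ∧ b = '-')) :
    del2 (a :: b :: t) = a :: del2 (b :: t) := by
  by_cases ha : a = ' '
  · subst ha
    have hb : b ≠ '-' := fun hb => hab ⟨rfl, hb⟩
    cases b <;> simp_all [del2]
  · cases a <;> cases b <;> simp_all [del2]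

theorem del2_single (c : Char) : del2 [c] = [c] := by
  cases c <;> simp [del2]

theorem fcGo_cons (a b : Char) (t : List Char) (hab : ¬(a = ' ' ∧ b = '-')) :
    fcGo (a :: b :: t) = if pvPunctB.contains a then fcGo (b :: t)
      else (if a = ' ' then '_' else a) :: fcGo (b :: t) := by
  by_cases ha : a = ' '
  · subst ha
    have hb : b ≠ '-' := fun hb => hab ⟨rfl, hb⟩
    cases b <;> simp_all [fcGo]
  · cases a <;> cases b <;> simp_all [fcGo]

theorem fcGo_single (c : Char) :
    fcGo [c] = if pvPunctB.contains c then []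
      else [if c = ' ' then '_' else c] := by
  cases c <;> simp [fcGo]

-- replace.go with needle " -" and empty replacement computes del2
theorem go_del2 (fuel : Nat) (l acc : List Char) (h : l.length ≤ fuel) :
    PySem.Chars.replace.go [' ', '-'] [] fuel l acc = acc.reverse ++ del2 l := by
  induction fuel generalizing l acc with
  | zero =>
    have : l = [] := List.length_eq_zero_iff.mp (Nat.le_zero.mp h)
    simp [this, PySem.Chars.replace.go, del2]
  | succ n ih =>
    match l with
    | [] => simp [PySem.Chars.replace.go, del2]
    | [a] =>
      have hp : List.isPrefixOf [' ', '-'] [a] = false := by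
        simp [List.isPrefixOf]
      simp only [PySem.Chars.replace.go, hp, Bool.false_eq_true, if_false]
      rw [ih _ _ (by simp)]
      cases a <;> simp [del2]
    | a :: b :: t =>
      simp only [List.length_cons] at h
      by_cases hab : a = ' ' ∧ b = '-'
      · obtain ⟨ha, hb⟩ := hab; subst ha; subst hb
        simp only [PySem.Chars.replace.go]
        rw [if_pos (by simp [List.isPrefixOf])]
        rw [show List.drop [' ', '-'].length (' ' :: '-' :: t) = t from rfl]
        rw [ih _ _ (by omega)]
        simp [del2]
      · have hp : List.isPrefixOf [' ', '-'] (a :: b :: t) = false := by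
          rcases not_and_or.mp hab with h1 | h1
          · simp [List.isPrefixOf, Ne.symm h1]
          · simp [List.isPrefixOf, Ne.symm h1]
        simp only [PySem.Chars.replace.go, hp, Bool.false_eq_true, if_false]
        rw [ih _ _ (by simp only [List.length_cons]; omega)]
        simp [del2_cons a b t hab]

theorem replace_del2 (l : List Char) :
    PySem.Chars.replace l [' ', '-'] [] = del2 l := by
  rw [PySem.Chars.replace]
  simp only [List.isEmpty_cons, Bool.false_eq_true, if_false]
  exact go_del2 l.length l [] le_rfl

-- replace.go with a one-char needle and empty replacement is a filter
theorem go_delete (c : Char) (fuel : Nat) (l acc : List Char) (h : l.length ≤ fuel) :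
    PySem.Chars.replace.go [c] [] fuel l acc = acc.reverse ++ l.filter (fun x => !(x == c)) := by
  induction fuel generalizing l acc with
  | zero =>
    have : l = [] := List.length_eq_zero_iff.mp (Nat.le_zero.mp h)
    simp [this, PySem.Chars.replace.go]
  | succ n ih =>
    cases l with
    | nil => simp [PySem.Chars.replace.go]
    | cons a t =>
      simp only [PySem.Chars.replace.go]
      simp only [List.length_cons] at h
      by_cases hc : a = c
      · subst hc
        rw [if_pos (by simp [List.isPrefixOf])]
        rw [show List.drop [a].length (a :: t) = t from rfl]
        rw [ih _ _ (by omega)]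
        simp
      · have hp : List.isPrefixOf [c] (a :: t) = false := by
          simp [List.isPrefixOf]; exact fun h' => (hc h'.symm).elim
        rw [if_neg (by simp [hp])]
        rw [ih _ _ (by omega)]
        simp [hc]

theorem replace_delete (c : Char) (l : List Char) :
    PySem.Chars.replace l [c] [] = l.filter (fun x => !(x == c)) := by
  rw [PySem.Chars.replace]
  simp only [List.isEmpty_cons, Bool.false_eq_true, if_false]
  exact go_delete c l.length l [] le_rfl

-- replace.go with one-char needle and one-char replacement is a map
theorem go_subst (c d : Char) (fuel : Nat) (l acc : List Char) (h : l.length ≤ fuel) :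
    PySem.Chars.replace.go [c] [d] fuel l acc
      = acc.reverse ++ l.map (fun x => if x = c then d else x) := by
  induction fuel generalizing l acc with
  | zero =>
    have : l = [] := List.length_eq_zero_iff.mp (Nat.le_zero.mp h)
    simp [this, PySem.Chars.replace.go]
  | succ n ih =>
    cases l with
    | nil => simp [PySem.Chars.replace.go]
    | cons a t =>
      simp only [PySem.Chars.replace.go]
      simp only [List.length_cons] at h
      by_cases hc : a = c
      · subst hc
        rw [if_pos (by simp [List.isPrefixOf])]
        rw [show List.drop [a].length (a :: t) = t from rfl]
        rw [ih _ _ (by omega)]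
        simp
      · have hp : List.isPrefixOf [c] (a :: t) = false := by
          simp [List.isPrefixOf]; exact fun h' => (hc h'.symm).elim
        rw [if_neg (by simp [hp])]
        rw [ih _ _ (by omega)]
        simp [hc]

theorem replace_subst (c d : Char) (l : List Char) :
    PySem.Chars.replace l [c] [d] = l.map (fun x => if x = c then d else x) := by
  rw [PySem.Chars.replace]
  simp only [List.isEmpty_cons, Bool.false_eq_true, if_false]
  exact go_subst c d l.length l [] le_rfl

-- the folded deletion loop is one filter over the whole alphabet
theorem foldl_delete (cs : List Char) (l : List Char) :
    cs.foldl (fun acc c => PySem.Chars.replace acc [c] []) l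
      = l.filter (fun x => !(cs.contains x)) := by
  induction cs generalizing l with
  | nil => simp
  | cons c cs ih =>
    rw [List.foldl_cons, replace_delete, ih, List.filter_filter]
    congr 1
    funext x
    by_cases hx : x = c <;> simp [hx]

-- the two alphabets are equal as sets (A's has a duplicated '/')
theorem mem_agree (a : Char) : a ∈ pvPunctA ↔ a ∈ pvPunctB := by
  unfold pvPunctA pvPunctB
  simp only [List.mem_cons, List.not_mem_nil, or_false]
  tauto

-- A's three last stages, run after del2, compute B's single scan
theorem stages_eq_fcGo (l : List Char) :
    ((del2 l).filter (fun x => !(pvPunctA.contains x))).map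
        (fun x => if x = ' ' then '_' else x) = fcGo l := by
  induction l using fcGo.induct with
  | case1 => rfl
  | case2 rest ih => simpa [del2, fcGo] using ih
  | case3 c rest hne hmem ih =>
    have hab : ∀ b t, rest = b :: t → ¬(c = ' ' ∧ b = '-') := by
      rintro b t hbt ⟨h1, h2⟩
      exact hne t h1 (by rw [hbt, h2])
    have hd : del2 (c :: rest) = c :: del2 rest := by
      cases rest with
      | nil => exact del2_single c
      | cons b t => exact del2_cons c b t (hab b t rfl)
    have hm : c ∈ pvPunctB := by simpa using hmem
    have hf : fcGo (c :: rest) = fcGo rest := by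
      cases rest with
      | nil => simp [fcGo_single c, hm, fcGo]
      | cons b t => simp [fcGo_cons c b t (hab b t rfl), hm]
    have hcA : c ∈ pvPunctA := (mem_agree c).mpr hm
    rw [hd, hf, List.filter_cons]
    simp only [List.contains_eq_mem] at ih
    simp [hcA, ih]
  | case4 c rest hne hmem ih =>
    have hab : ∀ b t, rest = b :: t → ¬(c = ' ' ∧ b = '-') := by
      rintro b t hbt ⟨h1, h2⟩
      exact hne t h1 (by rw [hbt, h2])
    have hd : del2 (c :: rest) = c :: del2 rest := by
      cases rest with
      | nil => exact del2_single c
      | cons b t => exact del2_cons c b t (hab b t rfl)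
    have hm : c ∉ pvPunctB := by simpa using hmem
    have hf : fcGo (c :: rest) = (if c = ' ' then '_' else c) :: fcGo rest := by
      cases rest with
      | nil => simp [fcGo_single c, hm, fcGo]
      | cons b t => simp [fcGo_cons c b t (hab b t rfl), hm]
    have hcA : c ∉ pvPunctA := fun h => hm ((mem_agree c).mp h)
    rw [hd, hf, List.filter_cons]
    simp only [List.contains_eq_mem] at ih
    simp [hcA, ih]

theorem filter_characters_eq (string : String) :
    filter_characters string = filter_characters_alt string := by
  unfold filter_characters filter_characters_alt
  apply String.ext
  have hfold : ∀ (cs : List Char) (s : String),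
      (cs.foldl (fun acc c => PySem.Str.replace acc (String.ofList [c]) "") s).toList
        = cs.foldl (fun acc c => PySem.Chars.replace acc [c] []) s.toList := by
    intro cs
    induction cs with
    | nil => intro s; rfl
    | cons c cs ih =>
      intro s
      rw [List.foldl_cons, List.foldl_cons, ih]
      congr 1
      simp [PySem.Str.toList_replace]
  simp only [PySem.Str.toList_replace, hfold, foldl_delete]
  rw [show (" -".toList) = [' ', '-'] from rfl, show ("".toList) = ([] : List Char) from rfl,
      replace_del2]
  rw [show (" ".toList) = [' '] from rfl, show ("_".toList) = ['_'] from rfl, replace_subst]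
  rw [stages_eq_fcGo]
  simp

-- ===== VERDICT =====
theorem filter_characters_spec : Claim_equal_filter_characters := by
  intro string _
  unfold Spec_filter_characters
  exact filter_characters_eq string
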